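-- pv_equiv track=rewrite | github.com/Mad-Hat-uvm/leetcode-for-asic-verification | Problem_004_Fifo_push_pop_validator/solution.py | is_valid_fifo_behavior
-- ===== SOURCE A (Python) =====
-- def is_valid_fifo_behavior(push_seq, pop_seq):
--     fifo_queue = []
--     i = 0  #Index into pop_seq
--
--     for val in push_seq:
--         fifo_queue.append(val)
--
--         #Try to match as many pops as possible
--         while fifo_queue and i < len(pop_seq) and fifo_queue[0] == pop_seq[i]:
--             fifo_queue.pop(0)
--             i += 1
--
--     return i == len(pop_seq)
-- ===== SOURCE B (Python) =====
-- def is_valid_fifo_behavior(push_seq, pop_seq):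
--     matched = 0
--     for p, q in zip(push_seq, pop_seq):
--         if p != q:
--             break
--         matched += 1
--     return matched == len(pop_seq)
-- ===== Notes on version B (the rewrite author's own statement) =====
-- stated objective: simpler
-- what changed: Replaces the simulated queue with greedy inner while-pops by a single zip pass counting the element-wise common prefix of push_seq and pop_seq, returning whether it covers all of pop_seq.
import Mathlib
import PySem

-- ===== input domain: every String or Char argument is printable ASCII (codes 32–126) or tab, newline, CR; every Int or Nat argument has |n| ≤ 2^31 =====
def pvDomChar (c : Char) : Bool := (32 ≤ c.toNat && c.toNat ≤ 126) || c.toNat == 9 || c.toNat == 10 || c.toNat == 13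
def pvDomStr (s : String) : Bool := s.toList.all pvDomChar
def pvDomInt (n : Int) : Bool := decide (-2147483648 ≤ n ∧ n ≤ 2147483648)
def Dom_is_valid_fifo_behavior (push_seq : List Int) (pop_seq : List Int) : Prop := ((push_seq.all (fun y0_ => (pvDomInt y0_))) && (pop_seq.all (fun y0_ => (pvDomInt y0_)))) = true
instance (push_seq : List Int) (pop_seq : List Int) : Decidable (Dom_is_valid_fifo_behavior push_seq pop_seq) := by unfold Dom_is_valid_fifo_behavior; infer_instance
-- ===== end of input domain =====

-- B replaces A's simulated queue + inner pop loop by one zip-style prefix-count pass (objective: simpler).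
-- ===== PORT A =====
-- inner `while fifo_queue and i < len(pop_seq) and fifo_queue[0] == pop_seq[i]` loop (structural on the queue)
def pvPopLoop (ps : List Int) : List Int → Nat → List Int × Nat
  | [], i => ([], i)
  | v :: rest, i =>
    if i < ps.length ∧ ps.getD i 0 = v then pvPopLoop ps rest (i + 1)
    else (v :: rest, i)

-- `for val in push_seq` loop over state (fifo_queue, i)
def pvPushLoop (ps : List Int) : List Int → List Int × Nat → List Int × Nat
  | [], st => st
  | v :: rest, st => pvPushLoop ps rest (pvPopLoop ps (st.1 ++ [v]) st.2)

def is_valid_fifo_behavior (push_seq : List Int) (pop_seq : List Int) : Bool :=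
  decide ((pvPushLoop pop_seq push_seq ([], 0)).2 = pop_seq.length)

-- ===== PORT B =====
-- `for p, q in zip(...)` counting matches, breaking on the first mismatch
def pvMatched : List Int → List Int → Nat
  | p :: ps, q :: qs => if p ≠ q then 0 else pvMatched ps qs + 1
  | _, _ => 0

def is_valid_fifo_behavior_alt (push_seq : List Int) (pop_seq : List Int) : Bool :=
  decide (pvMatched push_seq pop_seq = pop_seq.length)

-- ===== PRECONDITION & SPEC =====
def Spec_is_valid_fifo_behavior (push_seq : List Int) (pop_seq : List Int) (out : Bool) : Prop := out = is_valid_fifo_behavior_alt push_seq pop_seq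
instance (push_seq : List Int) (pop_seq : List Int) (out : Bool) : Decidable (Spec_is_valid_fifo_behavior push_seq pop_seq out) := by unfold Spec_is_valid_fifo_behavior; infer_instance

-- ===== CLAIM (what is proved, stated in full; the proofs are below) =====
def Claim_equal_is_valid_fifo_behavior : Prop := ∀ (push_seq : List Int) (pop_seq : List Int), Dom_is_valid_fifo_behavior push_seq pop_seq → Spec_is_valid_fifo_behavior push_seq pop_seq (is_valid_fifo_behavior push_seq pop_seq)

-- ===== LEMMAS AND PROOFS =====

theorem pvMatched_le_left : ∀ (xs ps : List Int), pvMatched xs ps ≤ xs.length := by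
  intro xs
  induction xs with
  | nil => intro ps; cases ps <;> simp [pvMatched]
  | cons x xs ih =>
    intro ps
    cases ps with
    | nil => simp [pvMatched]
    | cons p ps =>
      simp only [pvMatched, List.length_cons]
      split
      · omega
      · have := ih ps; omega

-- when the count stops inside xs, it stopped for a reason: ps exhausted or a mismatch at index c
theorem pvMatched_stuck : ∀ (xs ps : List Int), pvMatched xs ps < xs.length →
    ¬ (pvMatched xs ps < ps.length ∧ ps.getD (pvMatched xs ps) 0 = xs.getD (pvMatched xs ps) 0) := by
  intro xs
  induction xs with
  | nil => intro ps h; simp at h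
  | cons x xs ih =>
    intro ps h
    cases ps with
    | nil => simp
    | cons p ps =>
      simp only [pvMatched] at h ⊢
      by_cases hpq : x ≠ p
      · simp [hpq]; intro _; omega
      · simp only [hpq, ite_false] at h ⊢
        simp only [List.length_cons] at h
        have h' : pvMatched xs ps < xs.length := by omega
        have := ih ps h'
        simp only [List.length_cons, List.getD_cons_succ]
        intro hc
        exact this ⟨by omega, by simpa using hc.2⟩

-- snoc lemmas for the count
theorem pvMatched_snoc_lt : ∀ (xs ps : List Int) (v : Int), pvMatched xs ps < xs.length →
    pvMatched (xs ++ [v]) ps = pvMatched xs ps := by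
  intro xs
  induction xs with
  | nil => intro ps v h; simp at h
  | cons x xs ih =>
    intro ps v h
    cases ps with
    | nil => simp [pvMatched]
    | cons p ps =>
      simp only [pvMatched, List.cons_append] at h ⊢
      by_cases hpq : x ≠ p
      · simp [hpq]
      · simp only [hpq, ite_false] at h ⊢
        simp only [List.length_cons] at h
        rw [ih ps v (by omega)]

theorem pvMatched_snoc_eq : ∀ (xs ps : List Int) (v : Int), pvMatched xs ps = xs.length →
    pvMatched (xs ++ [v]) ps =
      if xs.length < ps.length ∧ ps.getD xs.length 0 = v then xs.length + 1 else xs.length := by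
  intro xs
  induction xs with
  | nil =>
    intro ps v h
    cases ps with
    | nil => simp [pvMatched]
    | cons p ps =>
      simp only [List.nil_append, List.length_nil, pvMatched, List.length_cons,
        List.getD_cons_zero]
      by_cases hv : p = v
      · cases ps <;> simp [hv]
      · cases ps <;> simp [Ne.symm hv, hv]
  | cons x xs ih =>
    intro ps v h
    cases ps with
    | nil => simp [pvMatched] at h
    | cons p ps =>
      simp only [pvMatched, List.length_cons] at h
      by_cases hpq : x ≠ p
      · simp [hpq] at h
      · simp only [hpq, ite_false] at h
        simp only [List.cons_append, pvMatched, hpq, ite_false, List.length_cons,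
          List.getD_cons_succ]
        rw [ih ps v (by omega)]
        by_cases hcnd : xs.length < ps.length ∧ ps.getD xs.length 0 = v
        · rw [if_pos hcnd, if_pos ⟨by omega, hcnd.2⟩]
        · rw [if_neg hcnd, if_neg (fun hh => hcnd ⟨by omega, hh.2⟩)]

-- main invariant: after processing xs, the state is (xs.drop c, c) with c = pvMatched xs ps
theorem pvInvariant (ps : List Int) : ∀ (xs : List Int),
    pvPushLoop ps xs ([], 0) = (xs.drop (pvMatched xs ps), pvMatched xs ps) := by
  intro xs
  induction xs using List.reverseRecOn with
  | nil => cases ps <;> simp [pvPushLoop, pvMatched]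
  | append_singleton xs v ih =>
    have hstep : ∀ (ys : List Int) (st : List Int × Nat),
        pvPushLoop ps (ys ++ [v]) st = pvPopLoop ps ((pvPushLoop ps ys st).1 ++ [v]) (pvPushLoop ps ys st).2 := by
      intro ys
      induction ys with
      | nil => intro st; simp [pvPushLoop]
      | cons y ys ihy => intro st; simp only [List.cons_append, pvPushLoop]; exact ihy _
    rw [hstep xs ([], 0), ih]
    simp only
    set c := pvMatched xs ps with hc
    have hle := pvMatched_le_left xs ps
    by_cases hlt : c < xs.length
    · -- stuck inside xs: nothing pops, count unchanged
      have hstuck := pvMatched_stuck xs ps hlt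
      rw [pvMatched_snoc_lt xs ps v hlt]
      have hdrop : xs.drop c = xs[c] :: xs.drop (c + 1) := List.drop_eq_getElem_cons hlt
      have hdrop2 : (xs ++ [v]).drop c = xs.drop c ++ [v] := by
        rw [List.drop_append_of_le_length (by omega)]
      rw [hdrop2, hdrop]
      simp only [List.cons_append, pvPopLoop]
      rw [if_neg]
      intro hcond
      apply hstuck
      refine ⟨hcond.1, ?_⟩
      rw [hcond.2]
      simp only [List.getD, ← hc, List.getElem?_eq_getElem hlt, Option.getD_some]
    · -- all of xs matched: the queue is empty, only the new element [v] remains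
      have hceq : c = xs.length := by omega
      rw [pvMatched_snoc_eq xs ps v (hc ▸ hceq)]
      rw [hceq, List.drop_length]
      simp only [List.nil_append, pvPopLoop]
      by_cases hcnd : xs.length < ps.length ∧ ps.getD xs.length 0 = v
      · rw [if_pos hcnd, if_pos hcnd]
        rw [show xs.length + 1 = (xs ++ [v]).length by simp, List.drop_length]
      · rw [if_neg hcnd, if_neg hcnd]
        rw [List.drop_append_of_le_length (by omega), List.drop_length]
        simp

-- ===== VERDICT (by name: the statement is the Claim_ definition above) =====
theorem is_valid_fifo_behavior_spec : Claim_equal_is_valid_fifo_behavior := by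
  intro push_seq pop_seq _
  unfold Spec_is_valid_fifo_behavior is_valid_fifo_behavior is_valid_fifo_behavior_alt
  rw [pvInvariant]
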